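-- pv_equiv track=rewrite | github.com/petrvanblokland/TYPETR-Assistants | tnbits/compilers/f5/kernTools.py | _makeProfiles
-- ===== SOURCE A (Python) =====
-- def _sortValues(d):
--     for k, v in d.items():
--         d[k] = tuple(sorted(v))
--
-- def _makeProfiles(kerning):
--     # kerning must be flat!
--     profiles1 = {}
--     profiles2 = {}
--     for (first, second), value in kerning.items():
--         if first not in profiles1:
--             profiles1[first] = set()
--         profiles1[first].add((second, value))   # (oppositeGlyph, kernValue)
--         if second not in profiles2:
--             profiles2[second] = set()
--         profiles2[second].add((first, value))  # (oppositeGlyph, kernValue)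
--     _sortValues(profiles1)
--     _sortValues(profiles2)
--     return profiles1, profiles2
-- ===== SOURCE B (Python) =====
-- def _makeProfiles(kerning):
--     # Sort the whole item list once per profile; each per-glyph group is then
--     # already in sorted order, so no per-group set/sort is needed.
--     items = list(kerning.items())
--     g1 = {}
--     for (first, second), value in sorted(items, key=lambda it: (it[0][1], it[1])):
--         g1.setdefault(first, []).append((second, value))
--     g2 = {}
--     for (first, second), value in sorted(items, key=lambda it: (it[0][0], it[1])):
--         g2.setdefault(second, []).append((first, value))
--     profiles1 = {first: tuple(g1[first]) for (first, second) in kerning}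
--     profiles2 = {second: tuple(g2[second]) for (first, second) in kerning}
--     return profiles1, profiles2
-- ===== Notes on version B (the rewrite author's own statement) =====
-- stated objective: alternative
-- what changed: B sorts the whole kerning item list once per profile (by (second,value) resp. (first,value)) and groups the pre-sorted items per glyph with setdefault/append, instead of A's per-glyph sets that are each sorted separately; the result dicts are then rebuilt in first-occurrence key order.
import Mathlib
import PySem

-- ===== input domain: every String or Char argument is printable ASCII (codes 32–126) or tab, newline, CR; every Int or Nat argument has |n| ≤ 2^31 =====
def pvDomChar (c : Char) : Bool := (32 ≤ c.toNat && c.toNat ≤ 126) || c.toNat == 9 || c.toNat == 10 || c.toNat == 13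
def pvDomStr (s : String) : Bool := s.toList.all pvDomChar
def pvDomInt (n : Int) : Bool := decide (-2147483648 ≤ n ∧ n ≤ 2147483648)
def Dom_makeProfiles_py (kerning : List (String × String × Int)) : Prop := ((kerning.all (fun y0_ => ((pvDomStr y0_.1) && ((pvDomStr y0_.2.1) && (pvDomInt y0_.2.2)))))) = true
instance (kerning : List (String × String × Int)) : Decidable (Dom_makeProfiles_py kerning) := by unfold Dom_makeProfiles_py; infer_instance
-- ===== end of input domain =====

-- B replaces A's per-glyph sets (each sorted separately) by two global sorts of the item
-- list followed by a single grouping pass; same O(n log n) cost, different decomposition.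
-- The 'kerning' parameter is a Python dict; both ports decode the association list through
-- PySem.Dict.ofList (Python's dict construction) before iterating its items.

-- ===== PORT A =====
-- helper: the loop body's treatment of one profile dict ('if g not in d: d[g] = set()' then 'd[g].add(x)')
def pvStepA (d : PySem.Dict String (PySem.Set (String × Int))) (g : String) (x : String × Int) :
    PySem.Dict String (PySem.Set (String × Int)) :=
  let d := if d.contains g then d else d.insert g PySem.Set.empty
  d.modify g PySem.Set.empty (fun s => PySem.Set.add s x)

-- helper _sortValues: 'for k, v in d.items(): d[k] = tuple(sorted(v))'
-- (Python's sorted on (str, int) tuples compares lexicographically: sorted2 with the two components)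
def pvSortValues (d : PySem.Dict String (List (String × Int))) : PySem.Dict String (List (String × Int)) :=
  d.items.foldl (fun d' kv => d'.insert kv.1 (PySem.List.sorted2 kv.2 (fun p => p.1) (fun p => p.2))) d

def makeProfiles_py (kerning : List (String × String × Int)) :
    (List (String × List (String × Int))) × (List (String × List (String × Int))) :=
  let items := (PySem.Dict.ofList (kerning.map (fun t => ((t.1, t.2.1), t.2.2)))).items
  let p := items.foldl
    (fun (p : PySem.Dict String (PySem.Set (String × Int)) × PySem.Dict String (PySem.Set (String × Int))) it =>
      (pvStepA p.1 it.1.1 (it.1.2, it.2), pvStepA p.2 it.1.2 (it.1.1, it.2)))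
    (PySem.Dict.empty, PySem.Dict.empty)
  ((pvSortValues p.1).items, (pvSortValues p.2).items)

-- ===== PORT B =====
-- 'g.setdefault(k, []).append(x)' is exactly 'g[k] = g.get(k, []) + [x]', i.e. Dict.modify k [] (· ++ [x]);
-- 'g1[first]' in the comprehension always finds its key (g1 was built from every item), ported as getD.
def makeProfiles_py_alt (kerning : List (String × String × Int)) :
    (List (String × List (String × Int))) × (List (String × List (String × Int))) :=
  let items := (PySem.Dict.ofList (kerning.map (fun t => ((t.1, t.2.1), t.2.2)))).items
  let g1 := (PySem.List.sorted2 items (fun it => it.1.2) (fun it => it.2)).foldl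
    (fun (g : PySem.Dict String (List (String × Int))) it =>
      g.modify it.1.1 [] (fun l => l ++ [(it.1.2, it.2)])) PySem.Dict.empty
  let g2 := (PySem.List.sorted2 items (fun it => it.1.1) (fun it => it.2)).foldl
    (fun (g : PySem.Dict String (List (String × Int))) it =>
      g.modify it.1.2 [] (fun l => l ++ [(it.1.1, it.2)])) PySem.Dict.empty
  let p1 := items.foldl
    (fun (d : PySem.Dict String (List (String × Int))) it => d.insert it.1.1 (g1.getD it.1.1 [])) PySem.Dict.empty
  let p2 := items.foldl
    (fun (d : PySem.Dict String (List (String × Int))) it => d.insert it.1.2 (g2.getD it.1.2 [])) PySem.Dict.empty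
  (p1.items, p2.items)

-- ===== PRECONDITION & SPEC =====
def Spec_makeProfiles_py (kerning : List (String × String × Int)) (out : (List (String × List (String × Int))) × (List (String × List (String × Int)))) : Prop := out = makeProfiles_py_alt kerning
instance (kerning : List (String × String × Int)) (out : (List (String × List (String × Int))) × (List (String × List (String × Int)))) : Decidable (Spec_makeProfiles_py kerning out) := by unfold Spec_makeProfiles_py; infer_instance

-- ===== CLAIM (what is proved, stated in full; the proofs are below) =====
def Claim_equal_makeProfiles_py : Prop := ∀ (kerning : List (String × String × Int)), Dom_makeProfiles_py kerning → Spec_makeProfiles_py kerning (makeProfiles_py kerning)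

-- ===== LEMMAS AND PROOFS =====

-- a fold whose state is a pair updated componentwise splits into two folds
theorem pv_foldl_pair {α β γ : Type} (f : β → α → β) (g : γ → α → γ) :
    ∀ (l : List α) (b : β) (c : γ),
      l.foldl (fun p x => (f p.1 x, g p.2 x)) (b, c) = (l.foldl f b, l.foldl g c) := by
  intro l
  induction l with
  | nil => intro b c; rfl
  | cons a l ih => intro b c; simpa using ih (f b a) (g c a)

-- A's two-statement update of one profile dict is a single Dict.modify
theorem pvStepA_eq (d : PySem.Dict String (PySem.Set (String × Int))) (g : String) (x : String × Int) :
    pvStepA d g x = d.modify g [] (fun s => PySem.Set.add s x) := by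
  unfold pvStepA
  by_cases h : d.contains g
  · simp [h, PySem.Set.empty]
  · have h' : d.getD g [] = [] := PySem.Dict.getD_of_not_contains d [] (by simpa using h)
    simp [h, PySem.Dict.modify, PySem.Set.empty, PySem.Dict.insert_insert_self,
      PySem.Dict.getD_insert_self, h']

-- value of the set-grouping fold at one key
theorem pv_getD_grp {α : Type} (k : α → String) (v : α → String × Int) :
    ∀ (l : List α) (d : PySem.Dict String (PySem.Set (String × Int))) (c : String),
      (l.foldl (fun d it => d.modify (k it) [] (fun s => PySem.Set.add s (v it))) d).getD c []
        = PySem.Set.update (d.getD c []) ((l.filter (fun it => k it == c)).map v) := by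
  intro l
  induction l with
  | nil => intro d c; simp [PySem.Set.update]
  | cons a l ih =>
    intro d c
    simp only [List.foldl_cons, ih, List.filter_cons]
    by_cases h : k a = c
    · simp [h, PySem.Set.update]
    · simp [h, PySem.Dict.getD_modify, Ne.symm h]

-- value of an insert fold whose inserted value depends only on the key
theorem pv_getD_insert_fold {α : Type} (k : α → String) (w : String → List (String × Int)) :
    ∀ (l : List α) (d : PySem.Dict String (List (String × Int))) (c : String),
      (l.foldl (fun d it => d.insert (k it) (w (k it))) d).getD c []
        = if c ∈ l.map k then w c else d.getD c [] := by
  intro l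
  induction l with
  | nil => intro d c; simp
  | cons a l ih =>
    intro d c
    simp only [List.foldl_cons, ih, List.map_cons, List.mem_cons]
    by_cases hm : c ∈ l.map k
    · simp [hm]
    · by_cases h : c = k a
      · simp [hm, h, PySem.Dict.getD_insert]
      · simp [hm, h, PySem.Dict.getD_insert]

-- overwriting every key of a dict in items order rewrites the values in place
theorem pv_foldl_insert_items_aux {ν : Type} (g : ν → ν) :
    ∀ (suf pre : List (String × ν)), ((pre ++ suf).map Prod.fst).Nodup →
      suf.foldl (fun d kv => d.insert kv.1 (g kv.2)) (PySem.Dict.mk (pre ++ suf))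
        = PySem.Dict.mk (pre ++ suf.map (fun kv => (kv.1, g kv.2))) := by
  intro suf
  induction suf with
  | nil => intro pre _; simp
  | cons kv suf ih =>
    intro pre hnd
    have hnd' := hnd
    simp only [List.map_append, List.map_cons, List.nodup_append, List.nodup_cons] at hnd'
    obtain ⟨h1, ⟨h2, h3⟩, h4⟩ := hnd'
    have hpre : kv.1 ∉ pre.map Prod.fst := fun hm => (h4 kv.1 hm kv.1 (by simp)) rfl
    have hc : (PySem.Dict.mk (pre ++ kv :: suf)).contains kv.1 = true := by
      simp [PySem.Dict.contains]
    have hins : (PySem.Dict.mk (pre ++ kv :: suf)).insert kv.1 (g kv.2)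
        = PySem.Dict.mk ((pre ++ [(kv.1, g kv.2)]) ++ suf) := by
      rw [PySem.Dict.ext_iff, PySem.Dict.items_insert_of_contains _ _ hc]
      show (pre ++ kv :: suf).map _ = _
      rw [List.map_append, List.map_cons, List.append_assoc, List.singleton_append]
      have e1 : List.map (fun p => if (p.1 == kv.1) = true then (kv.1, g kv.2) else p) pre = pre := by
        conv_rhs => rw [← List.map_id pre]
        apply List.map_congr_left
        intro p hp
        have : p.1 ≠ kv.1 := fun he => hpre (he ▸ List.mem_map_of_mem hp)
        simp [this]
      have e2 : List.map (fun p => if (p.1 == kv.1) = true then (kv.1, g kv.2) else p) suf = suf := by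
        conv_rhs => rw [← List.map_id suf]
        apply List.map_congr_left
        intro p hp
        have : p.1 ≠ kv.1 := fun he => h2 (he ▸ List.mem_map_of_mem hp)
        simp [this]
      simp only [beq_iff_eq] at e1 e2 ⊢
      rw [e1, e2]
      simp
    simp only [List.foldl_cons, hins]
    have hnd2 : (((pre ++ [(kv.1, g kv.2)]) ++ suf).map Prod.fst).Nodup := by
      simpa using hnd
    rw [ih _ hnd2]
    simp

theorem pvSortValues_items (d : PySem.Dict String (List (String × Int))) (h : d.keys.Nodup) :
    (pvSortValues d).items
      = d.items.map (fun kv => (kv.1, PySem.List.sorted2 kv.2 (fun p => p.1) (fun p => p.2))) := by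
  have hnd : (([] ++ d.items).map Prod.fst).Nodup := by
    simpa [PySem.Dict.keys] using h
  have := pv_foldl_insert_items_aux
    (fun v => PySem.List.sorted2 v (fun p => p.1) (fun p => p.2)) d.items [] hnd
  simp only [List.nil_append] at this
  unfold pvSortValues
  rw [show d = PySem.Dict.mk d.items from rfl]
  rw [this]

-- Python's tuple sort key is the lexicographic order
theorem pv_sorted2_eq_sorted_lex {α : Type} (xs : List α) (k1 : α → String) (k2 : α → Int) :
    PySem.List.sorted2 xs k1 k2 = PySem.List.sorted xs (fun a => toLex (k1 a, k2 a)) := by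
  rw [PySem.List.sorted_eq_foldl_insertBy]
  have h : (fun (a b : α) => decide (k1 a < k1 b) || (!decide (k1 b < k1 a) && decide (k2 a < k2 b)))
      = (fun a b => decide (toLex (k1 a, k2 a) < toLex (k1 b, k2 b))) := by
    funext a b
    rcases lt_trichotomy (k1 a) (k1 b) with h | h | h
    · simp [Prod.Lex.toLex_lt_toLex, h]
    · simp [Prod.Lex.toLex_lt_toLex, h]
    · simp [Prod.Lex.toLex_lt_toLex, h, not_lt_of_gt h, ne_of_gt h]
  simp only [PySem.List.sorted2, h]
  simp

-- CRUX: sorting one group equals filtering the globally sorted item list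
theorem pv_crux (kf opp : (String × String) × Int → String)
    (hrec : ∀ it it' : (String × String) × Int, kf it = kf it' → opp it = opp it' → it.2 = it'.2 → it = it')
    (L : List ((String × String) × Int)) (hnd : L.Nodup) (f : String) :
    PySem.List.sorted2 ((L.filter (fun it => kf it == f)).map (fun it => (opp it, it.2)))
        (fun p => p.1) (fun p => p.2)
      = ((PySem.List.sorted2 L (fun it => opp it) (fun it => it.2)).filter (fun it => kf it == f)).map
          (fun it => (opp it, it.2)) := by
  rw [pv_sorted2_eq_sorted_lex, pv_sorted2_eq_sorted_lex]
  set K' : (String × String) × Int → Lex (String × Int) := fun it => toLex (opp it, it.2) with hK'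
  set S := PySem.List.sorted L K' with hS
  apply PySem.List.sorted_eq_of_perm_of_pairwise_lt
  · exact ((PySem.List.sorted_perm L K' false).filter _).map _
  · rw [List.pairwise_map]
    have hle : S.Pairwise (fun a b => K' a ≤ K' b) := PySem.List.sorted_pairwise L K'
    have hndS : S.Nodup := (PySem.List.sorted_perm L K' false).nodup_iff.mpr hnd
    have hcomb := (hle.filter (fun it => kf it == f)).and ((hndS.filter (fun it => kf it == f)))
    refine hcomb.imp_of_mem ?_
    intro a b ha hb hab
    obtain ⟨hle', hne⟩ := hab
    have hfa : kf a = f := by simpa using (List.mem_filter.mp ha).2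
    have hfb : kf b = f := by simpa using (List.mem_filter.mp hb).2
    refine lt_of_le_of_ne hle' ?_
    intro he
    apply hne
    have : (opp a, a.2) = (opp b, b.2) := by
      simpa [hK'] using he
    rw [Prod.mk.injEq] at this
    exact hrec a b (hfa.trans hfb.symm) this.1 this.2

-- one profile: A's grouping-into-sets-then-sort equals B's sort-then-group, as item lists
theorem pv_profile_eq (kf opp : (String × String) × Int → String)
    (hrec : ∀ it it' : (String × String) × Int, kf it = kf it' → opp it = opp it' → it.2 = it'.2 → it = it')
    (L : List ((String × String) × Int)) (hk : (L.map Prod.fst).Nodup) :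
    (pvSortValues (L.foldl (fun d it => d.modify (kf it) [] (fun s => PySem.Set.add s (opp it, it.2)))
        PySem.Dict.empty)).items
      = (L.foldl (fun d it => d.insert (kf it)
            (((PySem.List.sorted2 L (fun it => opp it) (fun it => it.2)).foldl
                (fun (g : PySem.Dict String (List (String × Int))) it =>
                  g.modify (kf it) [] (fun l => l ++ [(opp it, it.2)])) PySem.Dict.empty).getD (kf it) []))
          PySem.Dict.empty).items := by
  have hnd : L.Nodup := hk.of_map
  set S := PySem.List.sorted2 L (fun it => opp it) (fun it => it.2) with hSdef
  set G : PySem.Dict String (List (String × Int)) :=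
    S.foldl (fun g it => g.modify (kf it) [] (fun l => l ++ [(opp it, it.2)])) PySem.Dict.empty with hGdef
  set Dmod := L.foldl (fun d it => d.modify (kf it) [] (fun s => PySem.Set.add s (opp it, it.2)))
    (PySem.Dict.empty : PySem.Dict String (PySem.Set (String × Int))) with hDmod
  set Dins := L.foldl (fun d it => d.insert (kf it) (G.getD (kf it) [])) PySem.Dict.empty with hDins
  have hkeysMod : Dmod.keys = PySem.Set.ofList (L.map kf) := by
    rw [hDmod, PySem.Dict.keys_foldl_modify_key]
    simp [PySem.Set.update_nil_left]
  have hkeysIns : Dins.keys = PySem.Set.ofList (L.map kf) := by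
    rw [hDins, PySem.Dict.keys_foldl_insert_key]
    simp [PySem.Set.update_nil_left]
  have hndMod : Dmod.keys.Nodup := by
    rw [hDmod]
    exact PySem.Dict.nodup_keys_foldl_modify_key _ _ _ _ _ (by simp [PySem.Dict.nodup_keys_empty])
  have hndIns : Dins.keys.Nodup := by
    rw [hDins]
    exact PySem.Dict.nodup_keys_foldl_insert_key _ _ _ _ (by simp [PySem.Dict.nodup_keys_empty])
  have hGval : ∀ c, G.getD c [] = (S.filter (fun it => kf it == c)).map (fun it => (opp it, it.2)) := by
    intro c
    have hfm := List.foldl_map (f := fun it => ((kf it, (opp it, it.2)) : String × (String × Int)))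
      (g := fun (g : PySem.Dict String (List (String × Int))) p => g.modify p.1 [] (fun l => l ++ [p.2]))
      (l := S) (init := PySem.Dict.empty)
    simp only [] at hfm
    rw [hGdef, ← hfm, PySem.Dict.getD_foldl_modify_append]
    simp [List.filter_map, List.map_map, Function.comp_def]
  have hModval : ∀ c, Dmod.getD c []
      = (L.filter (fun it => kf it == c)).map (fun it => (opp it, it.2)) := by
    intro c
    rw [hDmod, pv_getD_grp]
    rw [PySem.Dict.getD_empty, PySem.Set.update_nil_left]
    apply PySem.Set.ofList_eq_self_of_nodup
    refine (hnd.filter _).map_on ?_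
    intro x hx y hy hxy
    have h1 : kf x = c := by simpa using (List.mem_filter.mp hx).2
    have h2 : kf y = c := by simpa using (List.mem_filter.mp hy).2
    rw [Prod.mk.injEq] at hxy
    exact hrec x y (h1.trans h2.symm) hxy.1 hxy.2
  rw [pvSortValues_items Dmod hndMod,
      PySem.Dict.items_eq_map_keys Dmod hndMod [],
      PySem.Dict.items_eq_map_keys Dins hndIns [],
      hkeysMod, hkeysIns, List.map_map]
  apply List.map_congr_left
  intro c hc
  have hcL : c ∈ L.map kf := (PySem.Set.mem_ofList _ _).mp hc
  simp only [Function.comp_def]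
  have hins := pv_getD_insert_fold kf (fun c => G.getD c []) L PySem.Dict.empty c
  simp only [] at hins
  rw [hModval c, hDins, hins, if_pos hcL, hGval c]
  rw [pv_crux kf opp hrec L hnd c]

-- ===== VERDICT (by name: the statement is the Claim_ definition above) =====
theorem makeProfiles_py_spec : Claim_equal_makeProfiles_py := by
  intro kerning _hdom
  unfold Spec_makeProfiles_py makeProfiles_py makeProfiles_py_alt
  set L := (PySem.Dict.ofList (kerning.map (fun t => ((t.1, t.2.1), t.2.2)))).items with hL
  have hk : (L.map Prod.fst).Nodup := by
    have := PySem.Dict.nodup_keys_ofList (kerning.map (fun t => ((t.1, t.2.1), t.2.2)))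
    simpa [PySem.Dict.keys, hL] using this
  have hsplit := pv_foldl_pair
    (f := fun (d : PySem.Dict String (PySem.Set (String × Int))) (it : (String × String) × Int) =>
      d.modify it.1.1 [] (fun s => PySem.Set.add s (it.1.2, it.2)))
    (g := fun (d : PySem.Dict String (PySem.Set (String × Int))) (it : (String × String) × Int) =>
      d.modify it.1.2 [] (fun s => PySem.Set.add s (it.1.1, it.2)))
    L PySem.Dict.empty PySem.Dict.empty
  simp only [pvStepA_eq, hsplit]
  have h1 := pv_profile_eq (fun it => it.1.1) (fun it => it.1.2)
    (by
      intro it it' ha hb hc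
      obtain ⟨⟨a1, a2⟩, a3⟩ := it
      obtain ⟨⟨b1, b2⟩, b3⟩ := it'
      simp_all)
    L hk
  have h2 := pv_profile_eq (fun it => it.1.2) (fun it => it.1.1)
    (by
      intro it it' ha hb hc
      obtain ⟨⟨a1, a2⟩, a3⟩ := it
      obtain ⟨⟨b1, b2⟩, b3⟩ := it'
      simp_all)
    L hk
  simp only [] at h1 h2
  rw [Prod.mk.injEq]
  exact ⟨h1, h2⟩
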